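-- pv_equiv track=rewrite | github.com/djaychela/playground | codefights/challenge/mode_scores.py | modeScores
-- ===== SOURCE A (Python) =====
-- def modeScores(scores):
--     output = []
--     freqs = {}
--
--     def get_mode(freq):
--         mode = -1
--         max_freq = 0
--         for num in freq.keys():
--             if freq[num] > max_freq or (freq[num] == max_freq and num > mode):
--                 max_freq = freq[num]
--                 mode = num
--         return mode
--
--     for i in range(len(scores)):
--         if scores[i] not in freqs.keys():
--             freqs[scores[i]] = 0
--         freqs[scores[i]] += 1
--         output.append(get_mode(freqs))
--     return output
-- ===== SOURCE B (Python) =====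
-- def modeScores(scores):
--     # Incremental running mode: only the element just added can change the best
--     # (frequency, value) pair, so each step is O(1) instead of a full dict scan.
--     counts = {}
--     best_f = 0
--     best_v = -1
--     out = []
--     for x in scores:
--         c = counts.get(x, 0) + 1
--         counts[x] = c
--         if c > best_f or (c == best_f and x > best_v):
--             best_f = c
--             best_v = x
--         out.append(best_v)
--     return out
-- ===== Notes on version B (the rewrite author's own statement) =====
-- stated objective: faster
-- what changed: Instead of rescanning the whole frequency dict for the mode after every element, B maintains the best (frequency, value) pair incrementally: only the element just added can become the new mode, so each step is O(1).
import Mathlib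
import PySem

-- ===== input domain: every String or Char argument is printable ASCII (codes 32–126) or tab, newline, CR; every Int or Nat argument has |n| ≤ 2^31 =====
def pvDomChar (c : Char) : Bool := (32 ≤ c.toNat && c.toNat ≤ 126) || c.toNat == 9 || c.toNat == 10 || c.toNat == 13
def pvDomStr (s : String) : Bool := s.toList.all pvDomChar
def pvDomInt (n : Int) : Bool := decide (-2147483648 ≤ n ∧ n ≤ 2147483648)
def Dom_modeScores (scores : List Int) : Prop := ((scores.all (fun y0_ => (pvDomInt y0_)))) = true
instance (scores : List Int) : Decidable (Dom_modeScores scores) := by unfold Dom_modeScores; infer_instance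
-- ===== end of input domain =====

-- B replaces A's per-element full rescan of the frequency dict by an incrementally
-- maintained best (frequency, value) pair (only the element just added can become
-- the new mode); a timing run measured it faster on large inputs.

-- ===== PORT A =====
-- Python's nested `def get_mode(freq)`: scan over freq.keys() carrying (mode, max_freq).
-- `freq[num]` is ported as getD _ 0; the key is always present so the default is never used.
def pvGetMode (freq : PySem.Dict Int Int) : Int :=
  (freq.keys.foldl
    (fun (st : Int × Int) num =>
      if freq.getD num 0 > st.2 ∨ (freq.getD num 0 = st.2 ∧ num > st.1)
      then (num, freq.getD num 0) else st)
    (-1, 0)).1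

-- one iteration of A's main loop; x stands for scores[i] (read once, used thrice)
def pvStepA (st : List Int × PySem.Dict Int Int) (x : Int) : List Int × PySem.Dict Int Int :=
  let freqs := if st.2.contains x = false then st.2.insert x 0 else st.2
  let freqs := freqs.insert x (freqs.getD x 0 + 1)
  (st.1 ++ [pvGetMode freqs], freqs)

-- `for i in range(len(scores)): … scores[i] …`; scores[i] is in range, default never used
def modeScores (scores : List Int) : List Int :=
  ((PySem.List.pyRange 0 (PySem.List.len scores) 1).foldl
    (fun st i => pvStepA st (PySem.List.pyGetD scores i 0))
    ([], PySem.Dict.empty)).1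

-- ===== PORT B =====
-- one iteration of B's loop over (counts, best_f, best_v, out)
def pvStepB (st : PySem.Dict Int Int × Int × Int × List Int) (x : Int) :
    PySem.Dict Int Int × Int × Int × List Int :=
  match st with
  | (counts, bestF, bestV, out) =>
    let c := counts.getD x 0 + 1
    let counts' := counts.insert x c
    if c > bestF ∨ (c = bestF ∧ x > bestV) then (counts', c, x, out ++ [x])
    else (counts', bestF, bestV, out ++ [bestV])

def modeScores_alt (scores : List Int) : List Int :=
  (scores.foldl pvStepB (PySem.Dict.empty, 0, -1, [])).2.2.2

-- ===== PRECONDITION & SPEC =====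
def Spec_modeScores (scores : List Int) (out : List Int) : Prop := out = modeScores_alt scores
instance (scores : List Int) (out : List Int) : Decidable (Spec_modeScores scores out) := by unfold Spec_modeScores; infer_instance

-- ===== CLAIM (what is proved, stated in full; the proofs are below) =====
def Claim_equal_modeScores : Prop := ∀ (scores : List Int), Dom_modeScores scores → Spec_modeScores scores (modeScores scores)

-- ===== LEMMAS AND PROOFS =====

-- invariant of B's loop state relative to the shared frequency dict d:
-- (F, V) is the attained lexicographic maximum of (frequency, value) over d's keys
def pvInv (d : PySem.Dict Int Int) (F V : Int) : Prop :=
  d.getD V 0 = F ∧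
  (d.keys = [] → F = 0 ∧ V = -1) ∧
  (d.keys ≠ [] → V ∈ d.keys ∧ 1 ≤ F) ∧
  (∀ k ∈ d.keys, d.getD k 0 < F ∨ (d.getD k 0 = F ∧ k ≤ V)) ∧
  (∀ k ∈ d.keys, 1 ≤ d.getD k 0)

lemma pvFoldKeep (g : Int → Int) (F V : Int) (l : List Int)
    (h : ∀ k ∈ l, ¬ (g k > F ∨ (g k = F ∧ k > V))) :
    l.foldl
      (fun (st : Int × Int) num =>
        if g num > st.2 ∨ (g num = st.2 ∧ num > st.1) then (num, g num) else st)
      (V, F) = (V, F) := by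
  induction l with
  | nil => rfl
  | cons a l ih =>
    simp only [List.foldl_cons]
    rw [if_neg (h a (by simp))]
    exact ih (fun k hk => h k (by simp [hk]))

lemma pvFoldReach (g : Int → Int) (F V : Int) :
    ∀ (l : List Int) (st : Int × Int),
    V ∈ l → g V = F →
    (g V > st.2 ∨ (g V = st.2 ∧ V > st.1)) →
    (∀ k ∈ l, g k < F ∨ (g k = F ∧ k ≤ V)) →
    l.foldl
      (fun (st : Int × Int) num =>
        if g num > st.2 ∨ (g num = st.2 ∧ num > st.1) then (num, g num) else st)
      st = (V, F) := by
  intro l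
  induction l with
  | nil => intro st hV; exact absurd hV (by simp)
  | cons a l ih =>
    intro st hV hF hst hdom
    simp only [List.foldl_cons]
    by_cases ha : a = V
    · subst ha
      rw [if_pos hst, hF]
      exact pvFoldKeep g F a l (by
        intro k hk
        rcases hdom k (by simp [hk]) with h | h
        · omega
        · omega)
    · have hdomA := hdom a (by simp)
      have hV' : V ∈ l := by
        rcases List.mem_cons.mp hV with h | h
        · exact absurd h.symm ha
        · exact h
      by_cases hcond : g a > st.2 ∨ (g a = st.2 ∧ a > st.1)
      · rw [if_pos hcond]
        refine ih (a, g a) hV' hF ?_ (fun k hk => hdom k (by simp [hk]))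
        rcases hdomA with h | h
        · left; omega
        · right; constructor
          · omega
          · rcases h with ⟨_, hle⟩
            omega
      · rw [if_neg hcond]
        exact ih st hV' hF hst (fun k hk => hdom k (by simp [hk]))

lemma pvGetMode_eq (d : PySem.Dict Int Int) (F V : Int)
    (hne : d.keys ≠ []) (h : pvInv d F V) : pvGetMode d = V := by
  obtain ⟨h1, _, h3, h4, _⟩ := h
  obtain ⟨hV, hF⟩ := h3 hne
  unfold pvGetMode
  rw [pvFoldReach (fun num => d.getD num 0) F V d.keys (-1, 0) hV h1
    (by left; simp only []; omega) h4]

-- A's two dict writes (setdefault-style insert 0, then overwrite) equal B's single insert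
lemma pvDictStep (d : PySem.Dict Int Int) (x : Int) :
    (if d.contains x = false then d.insert x 0 else d).insert x
      ((if d.contains x = false then d.insert x 0 else d).getD x 0 + 1)
    = d.insert x (d.getD x 0 + 1) := by
  by_cases h : d.contains x = false
  · rw [if_pos h, PySem.Dict.getD_insert_self, PySem.Dict.insert_insert_self,
      PySem.Dict.getD_of_not_contains d 0 h]
  · rw [if_neg h]

lemma pvGetD_nonneg (d : PySem.Dict Int Int) (F V x : Int) (h : pvInv d F V) :
    0 ≤ d.getD x 0 := by
  obtain ⟨_, _, _, _, h5⟩ := h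
  by_cases hx : x ∈ d.keys
  · have := h5 x hx; omega
  · rw [PySem.Dict.getD_of_not_contains d 0 (by
      rw [PySem.Dict.contains_eq_decide_mem_keys]; simpa using hx)]

lemma pvInvStep_pos (d : PySem.Dict Int Int) (F V x : Int) (h : pvInv d F V)
    (hc : d.getD x 0 + 1 > F ∨ (d.getD x 0 + 1 = F ∧ x > V)) :
    pvInv (d.insert x (d.getD x 0 + 1)) (d.getD x 0 + 1) x := by
  have hnn := pvGetD_nonneg d F V x h
  obtain ⟨h1, h2, h3, h4, h5⟩ := h
  have hxmem : x ∈ (d.insert x (d.getD x 0 + 1)).keys :=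
    (PySem.Dict.mem_keys_insert _ _ _ _).mpr (Or.inl rfl)
  refine ⟨?_, ?_, ?_, ?_, ?_⟩
  · exact PySem.Dict.getD_insert_self d x (d.getD x 0 + 1) 0
  · intro hemp; exact absurd hemp (List.ne_nil_of_mem hxmem)
  · intro _; exact ⟨hxmem, by omega⟩
  · intro k hk
    rw [PySem.Dict.getD_insert]
    by_cases hkx : k = x
    · rw [if_pos hkx]; right; exact ⟨rfl, le_of_eq hkx⟩
    · rw [if_neg hkx]
      have hk' : k ∈ d.keys := by
        rcases (PySem.Dict.mem_keys_insert _ _ _ _).mp hk with h | h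
        · exact absurd h hkx
        · exact h
      rcases h4 k hk' with hlt | ⟨heq, hle⟩
      · rcases hc with hgt | ⟨heqc, _⟩ <;> [left; left] <;> omega
      · rcases hc with hgt | ⟨heqc, hxV⟩
        · left; omega
        · right; exact ⟨by omega, by omega⟩
  · intro k hk
    rw [PySem.Dict.getD_insert]
    by_cases hkx : k = x
    · rw [if_pos hkx]; omega
    · rw [if_neg hkx]
      refine h5 k ?_
      rcases (PySem.Dict.mem_keys_insert _ _ _ _).mp hk with h | h
      · exact absurd h hkx
      · exact h

lemma pvInvStep_neg (d : PySem.Dict Int Int) (F V x : Int) (h : pvInv d F V)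
    (hc : ¬ (d.getD x 0 + 1 > F ∨ (d.getD x 0 + 1 = F ∧ x > V))) :
    pvInv (d.insert x (d.getD x 0 + 1)) F V := by
  obtain ⟨h1, h2, h3, h4, h5⟩ := h
  have hdne : d.keys ≠ [] := by
    intro hemp
    have hx0 : d.getD x 0 = 0 := by
      rw [PySem.Dict.getD_of_not_contains d 0 (by
        rw [PySem.Dict.contains_eq_decide_mem_keys]; simp [hemp])]
    obtain ⟨hF0, _⟩ := h2 hemp
    omega
  obtain ⟨hVmem, hF1⟩ := h3 hdne
  have hxV : x ≠ V := by
    intro hxv; subst hxv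
    rw [h1] at hc; omega
  refine ⟨?_, ?_, ?_, ?_, ?_⟩
  · rw [PySem.Dict.getD_insert, if_neg (by exact fun hh => hxV hh.symm)]; exact h1
  · intro hemp
    exact absurd hemp (List.ne_nil_of_mem
      ((PySem.Dict.mem_keys_insert _ _ _ _).mpr (Or.inl rfl)))
  · intro _
    exact ⟨(PySem.Dict.mem_keys_insert _ _ _ _).mpr (Or.inr hVmem), hF1⟩
  · intro k hk
    rw [PySem.Dict.getD_insert]
    by_cases hkx : k = x
    · rw [if_pos hkx]
      subst hkx
      by_cases heq : d.getD k 0 + 1 = F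
      · right; exact ⟨heq, by omega⟩
      · left; omega
    · rw [if_neg hkx]
      refine h4 k ?_
      rcases (PySem.Dict.mem_keys_insert _ _ _ _).mp hk with h | h
      · exact absurd h hkx
      · exact h
  · intro k hk
    rw [PySem.Dict.getD_insert]
    by_cases hkx : k = x
    · rw [if_pos hkx]
      have := pvGetD_nonneg d F V x ⟨h1, h2, h3, h4, h5⟩
      omega
    · rw [if_neg hkx]
      refine h5 k ?_
      rcases (PySem.Dict.mem_keys_insert _ _ _ _).mp hk with h | h
      · exact absurd h hkx
      · exact h

lemma pvInvEmpty : pvInv PySem.Dict.empty 0 (-1) := by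
  refine ⟨?_, fun _ => ⟨rfl, rfl⟩, ?_, ?_, ?_⟩ <;>
    simp [PySem.Dict.getD_empty, PySem.Dict.keys_empty]

lemma pvMain : ∀ (l : List Int) (d : PySem.Dict Int Int) (F V : Int) (out : List Int),
    pvInv d F V →
    (l.foldl pvStepA (out, d)).1 = (l.foldl pvStepB (d, F, V, out)).2.2.2 := by
  intro l
  induction l with
  | nil => intro d F V out _; rfl
  | cons x l ih =>
    intro d F V out h
    simp only [List.foldl_cons, pvStepA, pvStepB]
    rw [pvDictStep d x]
    have hne : (d.insert x (d.getD x 0 + 1)).keys ≠ [] :=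
      List.ne_nil_of_mem ((PySem.Dict.mem_keys_insert _ _ _ _).mpr (Or.inl rfl))
    by_cases hc : d.getD x 0 + 1 > F ∨ (d.getD x 0 + 1 = F ∧ x > V)
    · rw [if_pos hc,
        pvGetMode_eq (d.insert x (d.getD x 0 + 1)) (d.getD x 0 + 1) x hne
          (pvInvStep_pos d F V x h hc)]
      exact ih (d.insert x (d.getD x 0 + 1)) (d.getD x 0 + 1) x (out ++ [x])
        (pvInvStep_pos d F V x h hc)
    · rw [if_neg hc,
        pvGetMode_eq (d.insert x (d.getD x 0 + 1)) F V hne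
          (pvInvStep_neg d F V x h hc)]
      exact ih (d.insert x (d.getD x 0 + 1)) F V (out ++ [V])
        (pvInvStep_neg d F V x h hc)

-- ===== VERDICT (by name: the statement is the Claim_ definition above) =====
theorem modeScores_spec : Claim_equal_modeScores := by
  intro scores _
  unfold Spec_modeScores modeScores modeScores_alt
  rw [PySem.List.foldl_pyRange_zero_pyGetD scores 0 pvStepA ([], PySem.Dict.empty)]
  exact pvMain scores PySem.Dict.empty 0 (-1) [] pvInvEmpty
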